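-- pv_equiv track=rewrite | github.com/uhsealevelcenter/pseudobinary | pseudobinary.py | pb2dec
-- ===== SOURCE A (Python) =====
-- def pb2dec(b):
--     bits = len(b) * 6
--     yy = ''
--     for d in range(0,len(b)):
--         dd = ord(b[d])
--         if dd > 63 : dd -= 64
--         yy += bin(dd)[2:].zfill(6)
--     val = int(yy,2)
--     # compute the 2's complement of int value val
--     if (val & (1 << (bits - 1))) != 0: # if sign bit is set e.g., 8bit: 128-255
--         val = val - (1 << bits)        # compute negative value
--     return val                         # return positive value as is
-- ===== SOURCE B (Python) =====
-- def pb2dec(b):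
--     val = 0
--     for c in b:
--         dd = ord(c)
--         if dd > 63:
--             dd -= 64
--         val = val * 64 + dd
--     bits = 6 * len(b)
--     if val >= 1 << (bits - 1):
--         val -= 1 << bits
--     return val
-- ===== Notes on version B (the rewrite author's own statement) =====
-- stated objective: simpler
-- what changed: B folds each 6-bit digit directly into an integer accumulator (val = val*64 + dd) and uses an arithmetic >= test for the sign bit, removing A's intermediate zfill'd bit-string construction and the separate int(yy,2) parse.
import Mathlib
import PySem

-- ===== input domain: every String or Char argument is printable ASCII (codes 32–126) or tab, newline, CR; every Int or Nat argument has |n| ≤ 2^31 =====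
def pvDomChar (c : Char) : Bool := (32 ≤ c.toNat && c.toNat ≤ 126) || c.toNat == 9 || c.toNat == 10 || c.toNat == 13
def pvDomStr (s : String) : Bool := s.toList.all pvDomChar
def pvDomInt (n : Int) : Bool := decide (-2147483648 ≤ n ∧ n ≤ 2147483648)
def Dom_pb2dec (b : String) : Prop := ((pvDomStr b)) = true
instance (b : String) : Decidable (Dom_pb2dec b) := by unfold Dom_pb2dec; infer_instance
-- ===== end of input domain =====

-- ===== PORT A =====
-- B changes: integer accumulator instead of building a binary string and re-parsing it (objective: simpler).

-- bin(dd)[2:] for dd : Nat (most-significant bit first; bin(0)[2:] = "0")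
def pbBin (n : Nat) : List Char := Nat.toDigits 2 n
-- .zfill(6)
def pbZfill6 (l : List Char) : List Char := List.replicate (6 - l.length) '0' ++ l
-- int(yy, 2): left fold over the binary digit characters
def pbParse (a : Int) (l : List Char) : Int :=
  l.foldl (fun a c => a * 2 + ((c.toNat : Int) - 48)) a
-- dd with the >63 correction
def pbDD (c : Char) : Nat := if c.toNat > 63 then c.toNat - 64 else c.toNat

def pb2dec (b : String) : Int :=
  let bits := b.toList.length * 6
  let yy := b.toList.foldl (fun yy c => yy ++ pbZfill6 (pbBin (pbDD c))) []
  let val := pbParse 0 yy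
  -- Python's  val & (1 << (bits-1)) ≠ 0  test, then  val - (1 << bits)
  if Int.land val ((2 : Int) ^ (bits - 1)) ≠ 0 then val - (2 : Int) ^ bits else val

-- ===== PORT B =====
def pb2dec_alt (b : String) : Int :=
  let val := b.toList.foldl (fun v c => v * 64 + (pbDD c : Int)) 0
  let bits := 6 * b.toList.length
  if val ≥ (2 : Int) ^ (bits - 1) then val - (2 : Int) ^ bits else val

-- ===== PRECONDITION & SPEC =====
-- Pre_ excludes only the empty string, where both A (int('',2)) and B (1 << -1) raise ValueError.
def Pre_pb2dec (b : String) : Prop := b ≠ ""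
instance (b : String) : Decidable (Pre_pb2dec b) := by unfold Pre_pb2dec; infer_instance
def pvWitness_pb2dec : String := "@ABC"
def Spec_pb2dec (b : String) (out : Int) : Prop := out = pb2dec_alt b
instance (b : String) (out : Int) : Decidable (Spec_pb2dec b out) := by unfold Spec_pb2dec; infer_instance

-- ===== CLAIM (what is proved, stated in full; the proofs are below) =====
def Claim_equal_pb2dec : Prop := ∀ (b : String), Dom_pb2dec b → Pre_pb2dec b → Spec_pb2dec b (pb2dec b)

-- ===== LEMMAS AND PROOFS =====

-- each 6-bit block parses back to its value (checked for all n < 64)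
theorem pbBlock_eval : ∀ n, n < 64 → pbParse 0 (pbZfill6 (pbBin n)) = n ∧ (pbZfill6 (pbBin n)).length = 6 := by
  decide

-- parsing from accumulator a shifts a by 2^length
theorem pbParse_shift (l : List Char) (a : Int) :
    pbParse a l = a * 2 ^ l.length + pbParse 0 l := by
  induction l generalizing a with
  | nil => simp [pbParse]
  | cons c t ih =>
    simp only [pbParse, List.foldl_cons, List.length_cons] at *
    rw [ih (a * 2 + ((c.toNat : Int) - 48)), ih ((0 : Int) * 2 + ((c.toNat : Int) - 48))]
    ring

theorem pbDD_lt (c : Char) (h : c.toNat < 128) : pbDD c < 64 := by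
  unfold pbDD; split <;> omega

-- main fold correspondence: parsing A's concatenated blocks = B's arithmetic fold
theorem pb_fold_eq (l : List Char) (acc : List Char)
    (h : ∀ c ∈ l, c.toNat < 128) :
    pbParse 0 (l.foldl (fun yy c => yy ++ pbZfill6 (pbBin (pbDD c))) acc)
      = l.foldl (fun v c => v * 64 + (pbDD c : Int)) (pbParse 0 acc) := by
  induction l generalizing acc with
  | nil => simp
  | cons c t ih =>
    simp only [List.foldl_cons]
    rw [ih _ (fun x hx => h x (List.mem_cons_of_mem _ hx))]
    congr 1
    have hc := pbDD_lt c (h c (List.mem_cons_self ..))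
    obtain ⟨hv, hl⟩ := pbBlock_eval (pbDD c) hc
    show pbParse 0 (acc ++ pbZfill6 (pbBin (pbDD c))) = _
    unfold pbParse at *
    rw [List.foldl_append]
    have := pbParse_shift (pbZfill6 (pbBin (pbDD c))) (List.foldl (fun a c => a * 2 + ((c.toNat : Int) - 48)) 0 acc)
    unfold pbParse at this
    rw [this, hl, hv]
    ring

-- bounds on B's fold
theorem pb_fold_bounds (l : List Char) (v : Int)
    (h : ∀ c ∈ l, c.toNat < 128) (hv0 : 0 ≤ v) (k : Nat) (hvk : v < 2 ^ k) :
    0 ≤ l.foldl (fun v c => v * 64 + (pbDD c : Int)) v ∧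
      l.foldl (fun v c => v * 64 + (pbDD c : Int)) v < 2 ^ (k + 6 * l.length) := by
  induction l generalizing v k with
  | nil => simpa using ⟨hv0, hvk⟩
  | cons c t ih =>
    have hc : (pbDD c : Int) < 64 := by exact_mod_cast pbDD_lt c (h c (List.mem_cons_self ..))
    have hc0 : (0 : Int) ≤ (pbDD c : Int) := Int.natCast_nonneg _
    have h1 : (0 : Int) ≤ v * 64 + (pbDD c : Int) := by positivity
    have h2 : v * 64 + (pbDD c : Int) < 2 ^ (k + 6) := by
      have : v * 64 ≤ (2 ^ k - 1) * 64 := by nlinarith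
      have hpow : (2 : Int) ^ (k + 6) = 2 ^ k * 64 := by ring
      omega
    have := ih (v * 64 + (pbDD c : Int)) (fun x hx => h x (List.mem_cons_of_mem _ hx)) h1 (k + 6) h2
    refine ⟨by simpa using this.1, ?_⟩
    have h3 := this.2
    have he : k + 6 + 6 * t.length = k + 6 * (c :: t).length := by simp [List.length_cons]; ring
    rw [he] at h3
    simpa using h3

-- the sign-bit test: for 0 ≤ v < 2^(k+1), v &&& 2^k ≠ 0 ↔ 2^k ≤ v
theorem pb_sign_test (v : Int) (k : Nat) (h0 : 0 ≤ v) (h1 : v < 2 ^ (k + 1)) :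
    (Int.land v ((2 : Int) ^ k) ≠ 0) ↔ (2 : Int) ^ k ≤ v := by
  lift v to Nat using h0
  rw [show ((2 : Int) ^ k) = ((2 ^ k : Nat) : Int) by push_cast; ring]
  rw [show Int.land (v : Int) ((2 ^ k : Nat) : Int) = (((v &&& 2 ^ k : Nat)) : Int) from rfl]
  have h1' : v < 2 ^ (k + 1) := by exact_mod_cast h1
  have hp : 0 < 2 ^ k := Nat.two_pow_pos k
  have h2 : (2 : Nat) ^ (k + 1) = 2 ^ k * 2 := by ring
  have hd : v / 2 ^ k < 2 := by
    rw [Nat.div_lt_iff_lt_mul hp]; omega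
  have hle : (2 ^ k ≤ v) ↔ 1 ≤ v / 2 ^ k := by
    rw [Nat.le_div_iff_mul_le hp, one_mul]
  rw [Nat.and_two_pow, Nat.testBit_eq_decide_div_mod_eq]
  by_cases hc : 2 ^ k ≤ v
  · have hq : v / 2 ^ k % 2 = 1 := by
      have ha := hle.mp hc
      omega
    rw [hq]
    norm_num
    exact_mod_cast hc
  · have hq : v / 2 ^ k = 0 := Nat.div_eq_of_lt (Nat.lt_of_not_le hc)
    rw [hq]
    norm_num
    exact_mod_cast Nat.lt_of_not_le hc

-- ===== VERDICT (by name: the statement is the Claim_ definition above) =====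
theorem pb2dec_spec : Claim_equal_pb2dec := by
  intro b hdom hpre
  unfold Spec_pb2dec
  have hchars : ∀ c ∈ b.toList, c.toNat < 128 := by
    intro c hc
    have := List.all_eq_true.mp hdom c hc
    unfold pvDomChar at this
    simp only [Bool.or_eq_true, Bool.and_eq_true, decide_eq_true_eq, beq_iff_eq] at this
    omega
  have hne : b.toList ≠ [] := by simpa [String.toList_eq_nil_iff] using hpre
  have hlen : 1 ≤ b.toList.length := by
    cases h : b.toList with
    | nil => exact absurd h hne
    | cons _ _ => simp
  set V := b.toList.foldl (fun v c => v * 64 + (pbDD c : Int)) 0 with hV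
  have hval : pbParse 0 (b.toList.foldl (fun yy c => yy ++ pbZfill6 (pbBin (pbDD c))) []) = V := by
    rw [pb_fold_eq b.toList [] hchars]
    simp [pbParse, hV]
  have hb := pb_fold_bounds b.toList 0 hchars le_rfl 0 (by norm_num)
  rw [← hV] at hb
  have hbound : V < 2 ^ ((6 * b.toList.length - 1) + 1) := by
    have h1 := hb.2
    have : (0 : Nat) + 6 * b.toList.length = (6 * b.toList.length - 1) + 1 := by omega
    rwa [this] at h1
  have hsign := pb_sign_test V (6 * b.toList.length - 1) hb.1 hbound
  simp only [pb2dec, pb2dec_alt]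
  rw [hval]
  have hbits : b.toList.length * 6 = 6 * b.toList.length := by ring
  rw [hbits]
  by_cases hc : (2 : Int) ^ (6 * b.toList.length - 1) ≤ V
  · rw [if_pos (hsign.mpr hc), if_pos (by exact hc)]
  · rw [if_neg (fun h => hc (hsign.mp h)), if_neg hc]
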